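-- pv_equiv track=rewrite | github.com/WookaszU/TrollSpamTwitter | code/tweetsApp/features_impl/FeaturesImpl.py | max_messages_number_in_time_window
-- ===== SOURCE A (Python) =====
-- def max_messages_number_in_time_window(users_tweets_timestamps):
--     results = []
--     time_gap = 60 * 5  # 15 min
--
--     for user_id, timestamps in users_tweets_timestamps.items():
--         max_msg_number = 0
--         i = 0
--         while i < len(timestamps):
--             timestamps_in_time_window = []
--             begin_from = timestamps[i]
--             j = i + 1
--             while j < len(timestamps):
--                 next_timestamp = timestamps[j]
--                 if begin_from + time_gap > next_timestamp:
--                     timestamps_in_time_window.append(next)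
--                     j += 1
--                 else:
--                     break
--             msg_number_in_window = len(timestamps_in_time_window)
--             if msg_number_in_window > max_msg_number:
--                 max_msg_number = msg_number_in_window
--
--             i += 1
--
--         results.append([user_id, max_msg_number + 1])   # +1 to count starting message
--
--     return results
-- ===== SOURCE B (Python) =====
-- def max_messages_number_in_time_window(users_tweets_timestamps):
--     results = []
--     time_gap = 60 * 5
--
--     for user_id, ts in users_tweets_timestamps.items():
--         n = len(ts)
--         best = 0
--         # stack of indices scanned right-to-left; idx/val parallel, values
--         # strictly decreasing from bottom (position 0) to top (end of list)
--         idx = []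
--         val = []
--         for i in range(n - 1, -1, -1):
--             t = ts[i]
--             while val and val[-1] <= t:
--                 val.pop()
--                 idx.pop()
--             limit = t + time_gap
--             # binary search: how many stack entries (a prefix) have value >= limit
--             lo, hi = 0, len(val)
--             while lo < hi:
--                 mid = (lo + hi) // 2
--                 if val[mid] >= limit:
--                     lo = mid + 1
--                 else:
--                     hi = mid
--             # nearest index to the right of i whose timestamp leaves the window
--             fail = idx[lo - 1] if lo else n
--             cnt = fail - i - 1
--             if cnt > best:
--                 best = cnt
--             idx.append(i)
--             val.append(t)
--         results.append([user_id, best + 1])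
--
--     return results
-- ===== Notes on version B (the rewrite author's own statement) =====
-- stated objective: alternative
-- what changed: A rescans forward from every starting tweet until the window breaks; B scans each user's timestamps once right-to-left, maintaining a monotonic stack of candidate window-breaking indices and binary-searching it for the first timestamp outside the 5-minute window.
import Mathlib
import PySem

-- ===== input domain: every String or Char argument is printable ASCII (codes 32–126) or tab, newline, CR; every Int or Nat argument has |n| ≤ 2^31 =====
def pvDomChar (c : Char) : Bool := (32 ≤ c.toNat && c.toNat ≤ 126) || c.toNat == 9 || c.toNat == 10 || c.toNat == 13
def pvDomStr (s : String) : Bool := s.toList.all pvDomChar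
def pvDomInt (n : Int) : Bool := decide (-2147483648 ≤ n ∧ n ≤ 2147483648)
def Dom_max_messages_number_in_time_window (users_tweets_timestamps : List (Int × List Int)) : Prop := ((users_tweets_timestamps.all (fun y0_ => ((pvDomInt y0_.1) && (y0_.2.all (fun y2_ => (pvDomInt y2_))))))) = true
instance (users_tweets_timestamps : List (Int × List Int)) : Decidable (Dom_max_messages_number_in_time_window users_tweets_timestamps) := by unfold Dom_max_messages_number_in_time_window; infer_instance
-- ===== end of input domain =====

-- B replaces A's rescan-forward-from-every-starting-tweet with a right-to-left
-- monotonic stack plus binary search over it; same return value, proved below.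

-- ===== PORT A =====
-- inner `while j < len(timestamps)` loop: Python appends the builtin `next` to a list
-- and only uses its length, so the accumulated list is ported as `List Unit`
def pvAInner (ts : List Int) (begin_from : Int) (j : Nat) : List Unit :=
  if j < ts.length then
    if begin_from + 300 > ts.getD j 0 then () :: pvAInner ts begin_from (j + 1) else []
  else []
termination_by ts.length - j

-- outer `while i < len(timestamps)` loop carrying max_msg_number
def pvAOuter (ts : List Int) (i : Nat) (max_msg_number : Int) : Int :=
  if i < ts.length then
    pvAOuter ts (i + 1)
      (if ((pvAInner ts (ts.getD i 0) (i + 1)).length : Int) > max_msg_number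
       then ((pvAInner ts (ts.getD i 0) (i + 1)).length : Int) else max_msg_number)
  else max_msg_number
termination_by ts.length - i

def max_messages_number_in_time_window (users_tweets_timestamps : List (Int × List Int)) : List (List Int) :=
  users_tweets_timestamps.foldl
    (fun results p => results ++ [[p.1, pvAOuter p.2 0 0 + 1]]) []

-- ===== PORT B =====
-- `while val and val[-1] <= t: val.pop(); idx.pop()`
def pvPop (idx val : List Int) (t : Int) : List Int × List Int :=
  if h : val ≠ [] then
    if val.getLast h ≤ t then pvPop idx.dropLast val.dropLast t else (idx, val)
  else (idx, val)
termination_by val.length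
decreasing_by
  simpa [List.length_dropLast] using Nat.sub_lt (List.length_pos_of_ne_nil h) one_pos

-- `while lo < hi: mid = (lo+hi)//2; ...` binary search on the stack values
def pvBisect (val : List Int) (limit : Int) (lo hi : Nat) : Nat :=
  if lo < hi then
    let mid := (lo + hi) / 2
    if val.getD mid 0 ≥ limit then pvBisect val limit (mid + 1) hi
    else pvBisect val limit lo mid
  else lo
termination_by hi - lo
decreasing_by all_goals omega

-- body of `for i in range(n-1, -1, -1)`; state = (idx, val, best)
def pvBStep (ts : List Int) (n : Int) (s : List Int × List Int × Int) (i : Int) :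
    List Int × List Int × Int :=
  let t := PySem.List.pyGetD ts i 0
  let p := pvPop s.1 s.2.1 t
  let limit := t + 60 * 5
  let lo := pvBisect p.2 limit 0 p.2.length
  let fail := if lo ≠ 0 then p.1.getD (lo - 1) 0 else n
  let cnt := fail - i - 1
  (p.1 ++ [i], p.2 ++ [t], if cnt > s.2.2 then cnt else s.2.2)

def pvBUser (ts : List Int) : Int :=
  let n : Int := ts.length
  ((PySem.List.pyRange (n - 1) (-1) (-1)).foldl (pvBStep ts n) ([], [], 0)).2.2

def max_messages_number_in_time_window_alt (users_tweets_timestamps : List (Int × List Int)) : List (List Int) :=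
  users_tweets_timestamps.foldl
    (fun results p => results ++ [[p.1, pvBUser p.2 + 1]]) []

-- ===== PRECONDITION & SPEC =====
def Spec_max_messages_number_in_time_window (users_tweets_timestamps : List (Int × List Int)) (out : List (List Int)) : Prop := out = max_messages_number_in_time_window_alt users_tweets_timestamps
instance (users_tweets_timestamps : List (Int × List Int)) (out : List (List Int)) : Decidable (Spec_max_messages_number_in_time_window users_tweets_timestamps out) := by unfold Spec_max_messages_number_in_time_window; infer_instance

-- ===== CLAIM (what is proved, stated in full; the proofs are below) =====
def Claim_equal_max_messages_number_in_time_window : Prop := ∀ (users_tweets_timestamps : List (Int × List Int)), Dom_max_messages_number_in_time_window users_tweets_timestamps → Spec_max_messages_number_in_time_window users_tweets_timestamps (max_messages_number_in_time_window users_tweets_timestamps)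

-- ===== LEMMAS AND PROOFS =====

-- value of ts at position k (both ports only index in range, so getD is exact)
def pvV (ts : List Int) (k : Nat) : Int := ts.getD k 0

-- count for starting index k: how many immediately following timestamps stay in the window
def pvCnt (ts : List Int) (k : Nat) : Nat :=
  ((ts.drop (k + 1)).takeWhile (fun x => decide (pvV ts k + 300 > x))).length

def pvMaxList (l : List Int) : Int := l.foldr max 0

def pvCnts (ts : List Int) (i : Nat) : List Int :=
  (List.range' i (ts.length - i)).map (fun k => (pvCnt ts k : Int))

-- `j` survives on the stack while scanning leftwards to `i` iff it beats everything in [i, j)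
def pvGood (ts : List Int) (i j : Nat) : Bool :=
  (List.range' i (j - i)).all (fun k => decide (pvV ts k < pvV ts j))

-- ascending version of the stack contents after index i has been processed
def pvStk (ts : List Int) (i : Nat) : List Nat :=
  (List.range' i (ts.length - i)).filter (pvGood ts i)

-- ascending version of the stack after the pops for index i but before i is pushed
def pvAsc' (ts : List Int) (i : Nat) : List Nat :=
  (List.range' (i + 1) (ts.length - (i + 1))).filter (pvGood ts i)

-- B's loop state after all indices ≥ i have been processed
def pvStateAt (ts : List Int) (i : Nat) : List Int × List Int × Int :=
  (PySem.List.pyRange ((ts.length : Int) - 1) ((i : Int) - 1) (-1)).foldl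
    (pvBStep ts ts.length) ([], [], 0)

theorem pvMaxList_cons (x : Int) (l : List Int) : pvMaxList (x :: l) = max x (pvMaxList l) := rfl

theorem pvMaxList_nonneg (l : List Int) : 0 ≤ pvMaxList l := by
  induction l with
  | nil => simp [pvMaxList]
  | cons a l ih => rw [pvMaxList_cons]; omega

theorem pvCnts_cons (ts : List Int) (i : Nat) (h : i < ts.length) :
    pvCnts ts i = (pvCnt ts i : Int) :: pvCnts ts (i + 1) := by
  unfold pvCnts
  have hlen : ts.length - i = (ts.length - (i + 1)) + 1 := by omega
  rw [hlen, List.range'_succ, List.map_cons]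

-- ---------- A side ----------

theorem a_inner_len (ts : List Int) (b : Int) (j : Nat) :
    (pvAInner ts b j).length
      = ((ts.drop j).takeWhile (fun x => decide (b + 300 > x))).length := by
  fun_induction pvAInner ts b j with
  | case1 j hj hcmp ih =>
    rw [List.drop_eq_getElem_cons hj]
    have hg : ts.getD j 0 = ts[j] := List.getD_eq_getElem ts 0 hj
    rw [hg] at hcmp
    rw [List.takeWhile_cons_of_pos (by simpa using hcmp)]
    simp [ih]
  | case2 j hj hcmp =>
    rw [List.drop_eq_getElem_cons hj]
    have hg : ts.getD j 0 = ts[j] := List.getD_eq_getElem ts 0 hj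
    rw [hg] at hcmp
    rw [List.takeWhile_cons_of_neg (by simpa using hcmp)]
    simp
  | case3 j hj =>
    rw [List.drop_eq_nil_of_le (by omega)]
    simp

theorem a_outer (ts : List Int) (i : Nat) (m : Int) :
    0 ≤ m → pvAOuter ts i m = max m (pvMaxList (pvCnts ts i)) := by
  fun_induction pvAOuter ts i m with
  | case1 i m hlt ih =>
    intro hm
    have hcnt : ((pvAInner ts (ts.getD i 0) (i + 1)).length : Int) = (pvCnt ts i : Int) := by
      rw [a_inner_len]; rfl
    rw [hcnt] at ih ⊢
    simp only [dite_eq_ite] at ih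
    rw [ih (by split <;> omega), pvCnts_cons ts i hlt, pvMaxList_cons]
    split <;> omega
  | case2 i m hlt =>
    intro hm
    unfold pvCnts
    have hz : ts.length - i = 0 := by omega
    rw [hz]
    simp [pvMaxList]
    omega

-- ---------- generic list facts ----------

theorem takeWhile_getD_true {α : Type} (p : α → Bool) (d : α) :
    ∀ (l : List α) (m : Nat), m < (l.takeWhile p).length → p (l.getD m d) = true := by
  intro l
  induction l with
  | nil => simp
  | cons a l ih =>
    intro m hm
    cases hp : p a with
    | false => rw [List.takeWhile_cons_of_neg (by simp [hp])] at hm; simp at hm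
    | true =>
      cases m with
      | zero => simpa [List.getD_cons_zero]
      | succ m =>
        rw [List.takeWhile_cons_of_pos (by simp [hp])] at hm
        simp only [List.length_cons] at hm
        rw [List.getD_cons_succ]
        exact ih m (by omega)

theorem takeWhile_getD_false {α : Type} (p : α → Bool) (d : α) :
    ∀ (l : List α), (l.takeWhile p).length < l.length →
      p (l.getD (l.takeWhile p).length d) = false := by
  intro l
  induction l with
  | nil => simp
  | cons a l ih =>
    intro hm
    cases hp : p a with
    | false =>
      rw [List.takeWhile_cons_of_neg (by simp [hp])]
      simpa [List.getD_cons_zero]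
    | true =>
      rw [List.takeWhile_cons_of_pos (by simp [hp])] at hm ⊢
      simp only [List.length_cons] at hm ⊢
      rw [List.getD_cons_succ]
      exact ih (by omega)

theorem drop_getD (ts : List Int) (a m : Nat) :
    (ts.drop a).getD m 0 = ts.getD (a + m) 0 := by
  simp [List.getD, List.getElem?_drop]

theorem getD_mem (l : List Int) (n : Nat) (h : n < l.length) : l.getD n 0 ∈ l := by
  rw [List.getD_eq_getElem l 0 h]; exact List.getElem_mem h

-- ---------- B side: characterizing the stack ----------

theorem good_iff (ts : List Int) (i j : Nat) :
    pvGood ts i j = true ↔ ∀ k, i ≤ k → k < j → pvV ts k < pvV ts j := by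
  unfold pvGood
  rw [List.all_eq_true]
  constructor
  · intro hall k hik hkj
    have := hall k (List.mem_range'_1.mpr (by omega))
    simpa using this
  · intro hk x hx
    rcases List.mem_range'_1.mp hx with ⟨h1, h2⟩
    simpa using hk x h1 (by omega)

theorem good_self (ts : List Int) (i : Nat) : pvGood ts i i = true := by
  rw [good_iff]; omega

theorem good_split (ts : List Int) (i j : Nat) (hij : i < j) :
    pvGood ts i j = (pvGood ts (i + 1) j && decide (pvV ts i < pvV ts j)) := by
  apply Bool.coe_iff_coe.mp
  rw [Bool.and_eq_true_iff, good_iff, good_iff, decide_eq_true_iff]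
  constructor
  · intro hk
    exact ⟨fun k h1 h2 => hk k (by omega) h2, hk i le_rfl hij⟩
  · rintro ⟨hk, hi⟩ k h1 h2
    rcases Nat.eq_or_lt_of_le h1 with he | hlt
    · rwa [← he]
    · exact hk k (by omega) h2

theorem filter_good_pairwise (ts : List Int) (i lo len : Nat) (hlo : i ≤ lo) :
    ((List.range' lo len).filter (pvGood ts i)).Pairwise (fun a b => pvV ts a < pvV ts b) := by
  have hp : ((List.range' lo len).filter (pvGood ts i)).Pairwise (· < ·) :=
    List.Pairwise.sublist List.filter_sublist List.pairwise_lt_range'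
  rw [List.pairwise_iff_forall_sublist] at hp ⊢
  intro a b hsub
  have hab := hp hsub
  have hbmem : b ∈ (List.range' lo len).filter (pvGood ts i) := hsub.subset (by simp)
  have hamem : a ∈ (List.range' lo len).filter (pvGood ts i) := hsub.subset (by simp)
  have hgb : pvGood ts i b = true := (List.mem_filter.mp hbmem).2
  have ha : lo ≤ a := (List.mem_range'_1.mp (List.mem_filter.mp hamem).1).1
  exact (good_iff ts i b).mp hgb a (by omega) hab

theorem stk_cons (ts : List Int) (i : Nat) (h : i < ts.length) :
    pvStk ts i = i :: pvAsc' ts i := by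
  unfold pvStk pvAsc'
  have hlen : ts.length - i = (ts.length - (i + 1)) + 1 := by omega
  rw [hlen, List.range'_succ, List.filter_cons_of_pos (good_self ts i)]

theorem asc'_eq (ts : List Int) (i : Nat) :
    pvAsc' ts i = (pvStk ts (i + 1)).filter (fun j => decide (pvV ts i < pvV ts j)) := by
  unfold pvAsc' pvStk
  rw [List.filter_filter]
  refine (List.filter_congr ?_).symm
  intro j hj
  have hij : i < j := by
    have := (List.mem_range'_1.mp hj).1; omega
  rw [good_split ts i j hij, Bool.and_comm]

-- pops from the Python end of the reversed stack = dropWhile at the front of the ascending list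
theorem pop_rev (c v : Nat → Int) (t : Int) :
    ∀ (asc : List Nat),
      pvPop ((asc.map c).reverse) ((asc.map v).reverse) t
        = (((asc.dropWhile fun j => decide (v j ≤ t)).map c).reverse,
           ((asc.dropWhile fun j => decide (v j ≤ t)).map v).reverse) := by
  intro asc
  induction asc with
  | nil => rw [pvPop]; simp
  | cons a l ih =>
    rw [pvPop]
    have hne : ((a :: l).map v).reverse ≠ [] := by simp
    rw [dif_pos hne]
    have hlast : (((a :: l).map v).reverse).getLast hne = v a := by
      rw [List.getLast_eq_iff_getLast?_eq_some, List.getLast?_reverse]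
      simp
    rw [hlast]
    by_cases hvt : v a ≤ t
    · rw [if_pos hvt]
      have h1 : (((a :: l).map c).reverse).dropLast = (l.map c).reverse := by
        rw [List.map_cons, List.dropLast_reverse]; simp
      have h2 : (((a :: l).map v).reverse).dropLast = (l.map v).reverse := by
        rw [List.map_cons, List.dropLast_reverse]; simp
      rw [h1, h2, ih, List.dropWhile_cons_of_pos (by simpa)]
    · rw [if_neg hvt, List.dropWhile_cons_of_neg (by simp only [decide_eq_true_eq]; omega)]

theorem dropWhile_eq_filter (v : Nat → Int) (t : Int) :
    ∀ (l : List Nat), l.Pairwise (fun a b => v a < v b) →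
      l.dropWhile (fun j => decide (v j ≤ t)) = l.filter (fun j => decide (t < v j)) := by
  intro l
  induction l with
  | nil => simp
  | cons a l ih =>
    intro hpw
    rcases List.pairwise_cons.mp hpw with ⟨hall, hl⟩
    by_cases hvt : v a ≤ t
    · rw [List.dropWhile_cons_of_pos (by simpa), List.filter_cons_of_neg (by simpa using hvt)]
      exact ih hl
    · rw [List.dropWhile_cons_of_neg (by simp only [decide_eq_true_eq]; omega),
         List.filter_cons_of_pos (by simp only [decide_eq_true_eq]; omega)]
      refine (congrArg _ (List.filter_eq_self.mpr fun b hb => ?_)).symm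
      have := hall b hb
      simp only [decide_eq_true_eq]
      omega

theorem pop_step (ts : List Int) (i : Nat) :
    pvPop (((pvStk ts (i + 1)).map (fun (j : Nat) => (j : Int))).reverse)
          (((pvStk ts (i + 1)).map (pvV ts)).reverse) (pvV ts i)
      = (((pvAsc' ts i).map (fun (j : Nat) => (j : Int))).reverse,
         ((pvAsc' ts i).map (pvV ts)).reverse) := by
  rw [pop_rev]
  have hpw : (pvStk ts (i + 1)).Pairwise (fun a b => pvV ts a < pvV ts b) :=
    filter_good_pairwise ts (i + 1) (i + 1) (ts.length - (i + 1)) (by omega)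
  rw [dropWhile_eq_filter (pvV ts) (pvV ts i) (pvStk ts (i + 1)) hpw, asc'_eq ts i]

-- ---------- binary search ----------

theorem count_prefix (limit : Int) :
    ∀ (V : List Int), V.Pairwise (fun a b => b < a) →
      ∀ p, p < V.length →
        ((limit ≤ V.getD p 0) ↔ p < V.countP (fun x => decide (limit ≤ x))) := by
  intro V
  induction V with
  | nil => simp
  | cons a l ih =>
    intro hpw p hp
    rcases List.pairwise_cons.mp hpw with ⟨ha, hl⟩
    rw [List.countP_cons]
    by_cases hla : limit ≤ a
    · rw [decide_eq_true hla]
      cases p with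
      | zero => simp [hla]
      | succ p =>
        rw [List.getD_cons_succ]
        simp only [List.length_cons] at hp
        rw [ih hl p (by omega)]
        simp only [if_true]
        omega
    · have h0 : l.countP (fun x => decide (limit ≤ x)) = 0 :=
        List.countP_eq_zero.mpr (fun x hx => by
          simp only [decide_eq_true_eq]; have := ha x hx; omega)
      rw [decide_eq_false hla, h0]
      cases p with
      | zero => simp [hla]
      | succ p =>
        rw [List.getD_cons_succ]
        simp only [List.length_cons] at hp
        have hx := ha _ (getD_mem l p (by omega))
        simp [List.getD] at hx ⊢
        omega

theorem bisect_prefix (V : List Int) (limit : Int) (c : Nat)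
    (H : ∀ p, p < V.length → ((limit ≤ V.getD p 0) ↔ p < c)) :
    ∀ (lo hi : Nat), lo ≤ c → c ≤ hi → hi ≤ V.length → pvBisect V limit lo hi = c := by
  suffices hs : ∀ (fuel lo hi : Nat), hi - lo ≤ fuel → lo ≤ c → c ≤ hi → hi ≤ V.length →
      pvBisect V limit lo hi = c from fun lo hi => hs (hi - lo) lo hi le_rfl
  intro fuel
  induction fuel with
  | zero =>
    intro lo hi hf h1 h2 h3
    rw [pvBisect, if_neg (by omega)]
    omega
  | succ fuel ih =>
    intro lo hi hf h1 h2 h3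
    rw [pvBisect]
    by_cases hlh : lo < hi
    · rw [if_pos hlh]
      have hmid : (lo + hi) / 2 < V.length := by omega
      by_cases hc : (lo + hi) / 2 < c
      · rw [if_pos (by exact (H _ hmid).mpr hc)]
        exact ih _ _ (by omega) (by omega) h2 h3
      · rw [if_neg (by intro hcon; exact hc ((H _ hmid).mp hcon))]
        exact ih _ _ (by omega) h1 (by omega) (by omega)
    · rw [if_neg hlh]; omega

-- ---------- the loop step preserves the invariant ----------

theorem step_inv (ts : List Int) (i : Nat) (h : i < ts.length) :
    pvBStep ts ts.length
      (((pvStk ts (i + 1)).map (fun (j : Nat) => (j : Int))).reverse,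
       ((pvStk ts (i + 1)).map (pvV ts)).reverse,
       pvMaxList (pvCnts ts (i + 1))) (i : Int)
    = (((pvStk ts i).map (fun (j : Nat) => (j : Int))).reverse,
       ((pvStk ts i).map (pvV ts)).reverse,
       pvMaxList (pvCnts ts i)) := by
  have ht : PySem.List.pyGetD ts (i : Int) 0 = pvV ts i := PySem.List.pyGetD_natCast ts i 0
  simp only [pvBStep, ht]
  rw [pop_step ts i]
  rw [show pvV ts i + 60 * 5 = pvV ts i + 300 from by norm_num]
  set V := (List.map (pvV ts) (pvAsc' ts i)).reverse with hVdef
  set limit := pvV ts i + 300 with hlimdef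
  set c := V.countP (fun x => decide (limit ≤ x)) with hcdef
  have hVpair : V.Pairwise (fun a b : Int => b < a) := by
    rw [hVdef, List.pairwise_reverse, List.pairwise_map]
    exact filter_good_pairwise ts i (i + 1) (ts.length - (i + 1)) (by omega)
  have hbis : pvBisect V limit 0 V.length = c :=
    bisect_prefix V limit c (count_prefix limit V hVpair) 0 V.length (Nat.zero_le c)
      List.countP_le_length le_rfl
  set L := pvCnt ts i with hLdef
  have hLle : L ≤ ts.length - (i + 1) := by
    have h1 : L = ((ts.drop (i + 1)).takeWhile (fun x => decide (pvV ts i + 300 > x))).length := rfl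
    have h2 := (List.takeWhile_sublist (fun x => decide (pvV ts i + 300 > x))
      (l := ts.drop (i + 1))).length_le
    rw [List.length_drop] at h2
    omega
  have hF1 : ∀ m, m < L → pvV ts (i + 1 + m) < limit := by
    intro m hm
    have := takeWhile_getD_true (fun x => decide (pvV ts i + 300 > x)) 0 (ts.drop (i + 1)) m hm
    rw [drop_getD] at this
    simp only [decide_eq_true_eq] at this
    have he2 : pvV ts (i + 1 + m) = ts.getD (i + 1 + m) 0 := rfl
    rw [hlimdef]
    omega
  have hmem_asc' : ∀ j, j ∈ pvAsc' ts i ↔ (i + 1 ≤ j ∧ j < ts.length ∧ pvGood ts i j = true) := by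
    intro j
    unfold pvAsc'
    rw [List.mem_filter, List.mem_range'_1]
    constructor
    · rintro ⟨⟨h1, h2⟩, h3⟩; exact ⟨h1, by omega, h3⟩
    · rintro ⟨h1, h2, h3⟩; exact ⟨⟨h1, by omega⟩, h3⟩
  have hcountP : c = (pvAsc' ts i).countP (fun j => decide (limit ≤ pvV ts j)) := by
    rw [hcdef, hVdef, List.countP_reverse, List.countP_map]
    rfl
  -- the computed window count equals pvCnt ts i
  have hC : (if pvBisect V limit 0 V.length ≠ 0 then
        ((List.map (fun (j : Nat) => (j : Int)) (pvAsc' ts i)).reverse).getD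
          (pvBisect V limit 0 V.length - 1) 0
      else (ts.length : Int)) - (i : Int) - 1 = (L : Int) := by
    rw [hbis]
    rcases Nat.lt_or_ge L (ts.length - (i + 1)) with hLlt | hLge
    · -- some later timestamp leaves the window; it sits on the stack at the end of the prefix
      set j0 := i + 1 + L with hj0def
      have hj0n : j0 < ts.length := by omega
      have hF2 : limit ≤ pvV ts j0 := by
        have hlen : ((ts.drop (i + 1)).takeWhile (fun x => decide (pvV ts i + 300 > x))).length
            < (ts.drop (i + 1)).length := by
          rw [List.length_drop]; exact hLlt
        have := takeWhile_getD_false (fun x => decide (pvV ts i + 300 > x)) 0 (ts.drop (i + 1)) hlen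
        rw [drop_getD] at this
        simp only [decide_eq_false_iff_not] at this
        rw [hlimdef]
        have hLe : ((ts.drop (i + 1)).takeWhile (fun x => decide (pvV ts i + 300 > x))).length = L := rfl
        rw [hLe] at this
        have he2 : pvV ts j0 = ts.getD (i + 1 + L) 0 := rfl
        omega
      have hj0mem : j0 ∈ pvAsc' ts i := by
        rw [hmem_asc']
        refine ⟨by omega, hj0n, ?_⟩
        rw [good_iff]
        intro k hk1 hk2
        rcases Nat.eq_or_lt_of_le hk1 with he | hlt
        · have : pvV ts k = pvV ts i := by rw [← he]
          rw [hlimdef] at hF2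
          omega
        · have := hF1 (k - (i + 1)) (by omega)
          rw [show i + 1 + (k - (i + 1)) = k from by omega] at this
          rw [hlimdef] at hF2
          omega
      obtain ⟨T, D, hTD⟩ := List.mem_iff_append.mp hj0mem
      have hpwlt : (pvAsc' ts i).Pairwise (· < ·) :=
        List.Pairwise.sublist List.filter_sublist List.pairwise_lt_range'
      rw [hTD] at hpwlt
      obtain ⟨hpT, hpJD, hcross⟩ := List.pairwise_append.mp hpwlt
      have hT : ∀ a ∈ T, a < j0 := fun a ha => hcross a ha j0 (by simp)
      have hD : ∀ b ∈ D, j0 < b := (List.pairwise_cons.mp hpJD).1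
      have hvT : ∀ a ∈ T, decide (limit ≤ pvV ts a) = false := by
        intro a ha
        have hamem : a ∈ pvAsc' ts i := by rw [hTD]; exact List.mem_append_left _ ha
        have h1 := (hmem_asc' a).mp hamem
        have h2 := hF1 (a - (i + 1)) (by have := hT a ha; omega)
        rw [show i + 1 + (a - (i + 1)) = a from by omega] at h2
        simp only [decide_eq_false_iff_not]
        omega
      have hvD : ∀ b ∈ j0 :: D, decide (limit ≤ pvV ts b) = true := by
        intro b hb
        rcases List.mem_cons.mp hb with rfl | hbD
        · exact decide_eq_true hF2
        · have hbmem : b ∈ pvAsc' ts i := by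
            rw [hTD]; exact List.mem_append_right _ (List.mem_cons_of_mem _ hbD)
          have hg := ((hmem_asc' b).mp hbmem).2.2
          have := (good_iff ts i b).mp hg j0 (by omega) (hD b hbD)
          simp only [decide_eq_true_eq]
          omega
      have hcval : c = D.length + 1 := by
        rw [hcountP, hTD, List.countP_append, List.countP_eq_zero.mpr (fun a ha => by simp [hvT a ha]),
          List.countP_eq_length.mpr hvD]
        simp
      rw [hcval]
      rw [if_pos (by omega)]
      have hidx : ((List.map (fun (j : Nat) => (j : Int)) (pvAsc' ts i)).reverse).getD
          (D.length + 1 - 1) 0 = (j0 : Int) := by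
        rw [hTD, List.map_append, List.reverse_append]
        rw [List.getD_append _ _ _ _ (by simp)]
        have hrev : ((List.map (fun (j : Nat) => (j : Int)) (j0 :: D)).reverse).getD (D.length + 1 - 1) 0
            = (List.map (fun (j : Nat) => (j : Int)) (j0 :: D)).getD 0 0 := by
          unfold List.getD
          rw [List.getElem?_reverse (by simp)]
          simp
        rw [hrev]
        simp
      rw [hidx]
      omega
    · -- no later timestamp leaves the window: the binary search finds nothing
      have hLeq : L = ts.length - (i + 1) := by omega
      have hc0 : c = 0 := by
        rw [hcountP]
        apply List.countP_eq_zero.mpr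
        intro j hj
        have hmem := (hmem_asc' j).mp hj
        have h2 := hF1 (j - (i + 1)) (by omega)
        rw [show i + 1 + (j - (i + 1)) = j from by omega] at h2
        simp only [decide_eq_true_eq]
        omega
      rw [hc0, if_neg (by omega)]
      omega
  rw [hC]
  rw [stk_cons ts i h, List.map_cons, List.map_cons, List.reverse_cons, List.reverse_cons,
    pvCnts_cons ts i h, pvMaxList_cons]
  refine Prod.ext rfl (Prod.ext rfl ?_)
  simp only []
  split <;> omega

-- ---------- the whole loop ----------

theorem stateAt_succ (ts : List Int) (i : Nat) (h : i < ts.length) :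
    pvStateAt ts i = pvBStep ts ts.length (pvStateAt ts (i + 1)) (i : Int) := by
  unfold pvStateAt
  have hsplit : PySem.List.pyRange ((ts.length : Int) - 1) ((i : Int) - 1) (-1)
      = PySem.List.pyRange ((ts.length : Int) - 1) (((i + 1 : Nat) : Int) - 1) (-1) ++ [(i : Int)] := by
    rw [PySem.List.pyRange_neg_one_eq_reverse, PySem.List.pyRange_neg_one_eq_reverse]
    rw [show (i : Int) - 1 + 1 = (i : Int) from by ring,
      show ((i + 1 : Nat) : Int) - 1 + 1 = (i : Int) + 1 from by push_cast; ring,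
      show (ts.length : Int) - 1 + 1 = (ts.length : Int) from by ring]
    rw [PySem.List.pyRange_one_cons (by exact_mod_cast h)]
    simp
  rw [hsplit, List.foldl_append]
  rfl

theorem state_inv (ts : List Int) :
    ∀ (d i : Nat), i + d = ts.length →
      pvStateAt ts i = (((pvStk ts i).map (fun (j : Nat) => (j : Int))).reverse,
        ((pvStk ts i).map (pvV ts)).reverse, pvMaxList (pvCnts ts i)) := by
  intro d
  induction d with
  | zero =>
    intro i hi
    have h1 : pvStateAt ts i = ([], [], 0) := by
      unfold pvStateAt
      rw [PySem.List.pyRange_neg_one_eq_nil (by omega)]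
      rfl
    have h2 : pvStk ts i = [] := by
      unfold pvStk
      rw [show ts.length - i = 0 from by omega]
      rfl
    have h3 : pvCnts ts i = [] := by
      unfold pvCnts
      rw [show ts.length - i = 0 from by omega]
      rfl
    rw [h1, h2, h3]
    rfl
  | succ d ih =>
    intro i hi
    have h : i < ts.length := by omega
    rw [stateAt_succ ts i h, ih (i + 1) (by omega), step_inv ts i h]

theorem equal_per_user (ts : List Int) : pvAOuter ts 0 0 = pvBUser ts := by
  have hA := a_outer ts 0 0 le_rfl
  have hB : pvBUser ts = pvMaxList (pvCnts ts 0) := by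
    have hs := state_inv ts ts.length 0 (by omega)
    unfold pvStateAt at hs
    rw [show ((0 : Nat) : Int) - 1 = (-1 : Int) from by norm_num] at hs
    simp only [pvBUser]
    rw [hs]
  rw [hA, hB]
  have := pvMaxList_nonneg (pvCnts ts 0)
  omega

-- ===== VERDICT (by name: the statement is the Claim_ definition above) =====
theorem max_messages_number_in_time_window_spec : Claim_equal_max_messages_number_in_time_window := by
  intro u _
  show _ = _
  unfold max_messages_number_in_time_window max_messages_number_in_time_window_alt
  rw [PySem.List.foldl_append_singleton_eq_map, PySem.List.foldl_append_singleton_eq_map]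
  exact congrArg _ (List.map_congr_left fun p _ => by rw [equal_per_user])
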